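-- pv_equiv track=rewrite | github.com/simdj/entry_log_analysis | intergrated_approach_2016_summer/data/preprocess_raw_data.py | exclude_run_outlier
-- ===== SOURCE A (Python) =====
-- def exclude_run_outlier(event_arr_sorted):
--     ret = []
--     run_flag = 0
--     for ev in event_arr_sorted:
--         action_type, action_timestamp = ev.split('~')
--         if action_type=='run':
--             if run_flag>=2:
--                 continue
--             else:
--                 ret.append(ev)
--             run_flag+=1
--         else:
--             run_flag=0
--             ret.append(ev)
--     return ret
-- ===== SOURCE B (Python) =====
-- def exclude_run_outlier(event_arr_sorted):
--     def is_run(ev):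
--         action_type, action_timestamp = ev.split('~')
--         return action_type == 'run'
--     ret = []
--     i = 0
--     n = len(event_arr_sorted)
--     while i < n:
--         k = is_run(event_arr_sorted[i])
--         j = i + 1
--         while j < n and is_run(event_arr_sorted[j]) == k:
--             j += 1
--         group = event_arr_sorted[i:j]
--         ret.extend(group[:2] if k else group)
--         i = j
--     return ret
-- ===== Notes on version B (the rewrite author's own statement) =====
-- stated objective: alternative
-- what changed: Replaces the run_flag counter loop by grouping maximal runs of consecutive equal-keyed events and keeping at most the first two of each 'run' group.
import Mathlib
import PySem

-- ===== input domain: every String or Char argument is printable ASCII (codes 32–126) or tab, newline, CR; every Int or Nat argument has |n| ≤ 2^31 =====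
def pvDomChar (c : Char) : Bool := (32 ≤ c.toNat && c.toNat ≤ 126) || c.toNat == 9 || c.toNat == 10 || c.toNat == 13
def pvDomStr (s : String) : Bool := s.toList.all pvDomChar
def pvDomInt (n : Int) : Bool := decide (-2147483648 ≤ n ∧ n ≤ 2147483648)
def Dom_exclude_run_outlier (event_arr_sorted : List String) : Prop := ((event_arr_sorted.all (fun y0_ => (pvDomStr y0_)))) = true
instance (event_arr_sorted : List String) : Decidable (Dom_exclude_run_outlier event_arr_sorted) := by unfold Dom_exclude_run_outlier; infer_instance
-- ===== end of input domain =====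

-- B groups consecutive same-keyed events instead of A's run_flag counter loop; return values only, no mutation.

-- ===== PORT A =====
-- one loop step: split, branch on action_type, maintain (ret, run_flag)
def stepA (st : List String × Int) (ev : String) : List String × Int :=
  -- 'action_type, action_timestamp = ev.split('~')' raises ValueError unless exactly 2 parts (excluded by Pre_)
  let action_type := ((PySem.Str.split? ev "~").getD []).headD ""
  if action_type == "run" then
    if st.2 ≥ 2 then st                 -- continue
    else (st.1 ++ [ev], st.2 + 1)       -- ret.append(ev); run_flag += 1
  else (st.1 ++ [ev], 0)                -- run_flag = 0; ret.append(ev)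

def exclude_run_outlier (event_arr_sorted : List String) : List String :=
  (event_arr_sorted.foldl stepA ([], 0)).1

-- ===== PORT B =====
-- is_run(ev): split-unpack then compare (unpack ValueError excluded by Pre_)
def isRunB (ev : String) : Bool :=
  ((PySem.Str.split? ev "~").getD []).headD "" == "run"

-- outer while loop: take the maximal group with the same key as the head, slice it, recurse on the rest
def goB : List String → List String
  | [] => []
  | x :: rest =>
    let k := isRunB x
    let grp := (x :: rest).takeWhile (fun e => isRunB e == k)
    let rest' := (x :: rest).dropWhile (fun e => isRunB e == k)
    (if k then grp.take 2 else grp) ++ goB rest'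
termination_by xs => xs.length
decreasing_by
  simp only [List.dropWhile_cons, beq_self_eq_true, if_pos]
  exact Nat.lt_succ_of_le (List.length_dropWhile_le _ _)

def exclude_run_outlier_alt (event_arr_sorted : List String) : List String :=
  goB event_arr_sorted

-- ===== PRECONDITION & SPEC =====
-- Pre_ excludes exactly the inputs where A's two-variable unpack of ev.split('~') raises ValueError
def Pre_exclude_run_outlier (event_arr_sorted : List String) : Prop :=
  ∀ ev ∈ event_arr_sorted, ((PySem.Str.split? ev "~").getD []).length = 2
instance (event_arr_sorted : List String) : Decidable (Pre_exclude_run_outlier event_arr_sorted) := by unfold Pre_exclude_run_outlier; infer_instance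
def pvWitness_exclude_run_outlier : List String := ["run~1", "run~2", "run~3", "go~4", "run~5"]

def Spec_exclude_run_outlier (event_arr_sorted : List String) (out : List String) : Prop := out = exclude_run_outlier_alt event_arr_sorted
instance (event_arr_sorted : List String) (out : List String) : Decidable (Spec_exclude_run_outlier event_arr_sorted out) := by unfold Spec_exclude_run_outlier; infer_instance

-- ===== CLAIM (what is proved, stated in full; the proofs are below) =====
def Claim_equal_exclude_run_outlier : Prop := ∀ (event_arr_sorted : List String), Dom_exclude_run_outlier event_arr_sorted → Pre_exclude_run_outlier event_arr_sorted → Spec_exclude_run_outlier event_arr_sorted (exclude_run_outlier event_arr_sorted)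

-- ===== LEMMAS AND PROOFS =====

-- A's loop without the accumulator
def auxA : List String → Int → List String
  | [], _ => []
  | ev :: rest, f =>
    if isRunB ev then
      (if f ≥ 2 then auxA rest f else ev :: auxA rest (f + 1))
    else ev :: auxA rest 0

lemma foldl_stepA (xs : List String) : ∀ (r : List String) (f : Int),
    (xs.foldl stepA (r, f)).1 = r ++ auxA xs f := by
  induction xs with
  | nil => intro r f; simp [auxA]
  | cons x rest ih =>
    intro r f
    simp only [List.foldl_cons, stepA, auxA, isRunB]
    split_ifs <;> simp [ih]

lemma auxA_flag_irrel (rest : List String) (f : Int)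
    (h : rest = [] ∨ ∃ y t, rest = y :: t ∧ isRunB y = false) :
    auxA rest f = auxA rest 0 := by
  rcases h with h | ⟨y, t, rfl, hy⟩
  · subst h; rfl
  · simp [auxA, hy]

lemma auxA_skip (t : List String) (rest : List String)
    (ht : ∀ y ∈ t, isRunB y = true) :
    auxA (t ++ rest) 2 = auxA rest 2 := by
  induction t with
  | nil => rfl
  | cons a t ih =>
    have ha := ht a (by simp)
    simp only [List.cons_append, auxA, ha, if_pos, ge_iff_le, le_refl]
    exact ih (fun y hy => ht y (by simp [hy]))

lemma auxA_run_group (ys rest : List String)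
    (hy : ∀ y ∈ ys, isRunB y = true) :
    ∃ f', auxA (ys ++ rest) 0 = ys.take 2 ++ auxA rest f' := by
  match ys with
  | [] => exact ⟨0, rfl⟩
  | [a] =>
    have ha := hy a (by simp)
    refine ⟨1, ?_⟩
    simp [auxA, ha]
  | a :: b :: t =>
    have ha := hy a (by simp)
    have hb := hy b (by simp)
    refine ⟨2, ?_⟩
    have ht : ∀ y ∈ t, isRunB y = true := fun y hyt => hy y (by simp [hyt])
    simp only [List.cons_append, auxA, ha, hb, if_true]
    norm_num
    exact auxA_skip t rest ht

lemma auxA_nonrun_group (ys : List String) (rest : List String)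
    (hy : ∀ y ∈ ys, isRunB y = false) :
    auxA (ys ++ rest) 0 = ys ++ auxA rest 0 := by
  induction ys with
  | nil => rfl
  | cons a t ih =>
    have ha := hy a (by simp)
    simp only [List.cons_append, auxA, ha, Bool.false_eq_true, if_false]
    simp [ih (fun y hyt => hy y (by simp [hyt]))]

lemma dropWhile_head_false {α : Type} (p : α → Bool) (l : List α) :
    l.dropWhile p = [] ∨ ∃ y t, l.dropWhile p = y :: t ∧ p y = false := by
  induction l with
  | nil => exact Or.inl rfl
  | cons a t ih =>
    by_cases ha : p a
    · simpa [List.dropWhile_cons, ha] using ih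
    · exact Or.inr ⟨a, t, by simp [ha], by simp [ha]⟩

lemma main_lemma : ∀ n (xs : List String), xs.length ≤ n → auxA xs 0 = goB xs := by
  intro n
  induction n with
  | zero =>
    intro xs h
    have : xs = [] := List.length_eq_zero_iff.mp (Nat.le_zero.mp h)
    subst this; simp [auxA, goB]
  | succ n ih =>
    intro xs hlen
    match xs with
    | [] => show auxA [] 0 = goB []; simp [auxA, goB]
    | x :: rest =>
      set p := fun e => isRunB e == isRunB x with hp
      have hsplit : (x :: rest).takeWhile p ++ (x :: rest).dropWhile p = x :: rest :=
        List.takeWhile_append_dropWhile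
      have hdroplen : ((x :: rest).dropWhile p).length ≤ n := by
        have hpx : p x = true := by simp [hp]
        have : (x :: rest).dropWhile p = rest.dropWhile p := by
          simp [hpx]
        rw [this]
        exact le_trans (List.length_dropWhile_le _ _) (Nat.lt_succ_iff.mp (Nat.lt_of_lt_of_le (Nat.lt_succ_of_le (le_refl _)) hlen))
      have ihdrop := ih _ hdroplen
      have hhead := dropWhile_head_false p (x :: rest)
      by_cases hk : isRunB x
      · -- run group
        have hall : ∀ y ∈ (x :: rest).takeWhile p, isRunB y = true := by
          intro y hy
          have := List.mem_takeWhile_imp hy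
          simp [hp, hk] at this
          exact this
        obtain ⟨f', hf'⟩ := auxA_run_group ((x :: rest).takeWhile p) ((x :: rest).dropWhile p) hall
        have hirrel : auxA ((x :: rest).dropWhile p) f' = auxA ((x :: rest).dropWhile p) 0 := by
          apply auxA_flag_irrel
          rcases hhead with h | ⟨y, t, he, hy⟩
          · exact Or.inl h
          · refine Or.inr ⟨y, t, he, ?_⟩
            simp [hp, hk] at hy
            simp [hy]
        calc auxA (x :: rest) 0 = auxA ((x :: rest).takeWhile p ++ (x :: rest).dropWhile p) 0 := by rw [hsplit]
          _ = ((x :: rest).takeWhile p).take 2 ++ auxA ((x :: rest).dropWhile p) f' := hf'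
          _ = ((x :: rest).takeWhile p).take 2 ++ goB ((x :: rest).dropWhile p) := by rw [hirrel, ihdrop]
          _ = goB (x :: rest) := by rw [goB]; simp [hp, hk]
      · -- non-run group
        have hall : ∀ y ∈ (x :: rest).takeWhile p, isRunB y = false := by
          intro y hy
          have := List.mem_takeWhile_imp hy
          simp [hp, Bool.eq_false_iff.mpr hk] at this
          simp [this]
        calc auxA (x :: rest) 0 = auxA ((x :: rest).takeWhile p ++ (x :: rest).dropWhile p) 0 := by rw [hsplit]
          _ = (x :: rest).takeWhile p ++ auxA ((x :: rest).dropWhile p) 0 := auxA_nonrun_group _ _ hall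
          _ = (x :: rest).takeWhile p ++ goB ((x :: rest).dropWhile p) := by rw [ihdrop]
          _ = goB (x :: rest) := by rw [goB]; simp [hp, Bool.eq_false_iff.mpr hk]

-- ===== VERDICT (by name: the statement is the Claim_ definition above) =====
theorem exclude_run_outlier_spec : Claim_equal_exclude_run_outlier := by
  intro xs _ _
  show (xs.foldl stepA ([], 0)).1 = goB xs
  rw [foldl_stepA xs [] 0, List.nil_append]
  exact main_lemma xs.length xs (le_refl _)
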